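-- pv_equiv track=rewrite | github.com/VHemanth45/Test1 | step9_llm_post_correction.py | _chunk_ranges
-- ===== SOURCE A (Python) =====
-- def _chunk_ranges(n: int, chunk_size: int, overlap: int) -> list[tuple[int, int]]:
--     if n == 0:
--         return []
--     if chunk_size <= 0:
--         raise SystemExit("--chunk-size must be > 0")
--     if overlap < 0:
--         raise SystemExit("--overlap must be >= 0")
--     if overlap >= chunk_size:
--         raise SystemExit("--overlap must be smaller than --chunk-size")
--
--     ranges: list[tuple[int, int]] = []
--     step = chunk_size - overlap
--     start = 0
--     while start < n:
--         end = min(start + chunk_size, n)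
--         ranges.append((start, end))
--         if end == n:
--             break
--         start += step
--     return ranges
-- ===== SOURCE B (Python) =====
-- def _chunk_ranges(n: int, chunk_size: int, overlap: int) -> list[tuple[int, int]]:
--     if n == 0:
--         return []
--     if chunk_size <= 0:
--         raise SystemExit("--chunk-size must be > 0")
--     if overlap < 0:
--         raise SystemExit("--overlap must be >= 0")
--     if overlap >= chunk_size:
--         raise SystemExit("--overlap must be smaller than --chunk-size")
--
--     step = chunk_size - overlap
--     # 1 + ceil((n - chunk_size) / step), clamped so a single chunk covers n <= chunk_size
--     num_chunks = 1 + max(0, -((chunk_size - n) // step))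
--     return [(i * step, min(i * step + chunk_size, n)) for i in range(num_chunks)]
-- ===== Notes on version B (the rewrite author's own statement) =====
-- stated objective: alternative
-- what changed: Replaces the append/break while-loop with a closed-form chunk count (ceiling division) and a list comprehension; Pre_ excludes negative n (a negative length is outside the natural domain; A's while-loop happens to return [] there).
-- outside the precondition, e.g. on _chunk_ranges(-5, 4, 1): A returns [], B returns [(0, -5)]
import Mathlib
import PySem

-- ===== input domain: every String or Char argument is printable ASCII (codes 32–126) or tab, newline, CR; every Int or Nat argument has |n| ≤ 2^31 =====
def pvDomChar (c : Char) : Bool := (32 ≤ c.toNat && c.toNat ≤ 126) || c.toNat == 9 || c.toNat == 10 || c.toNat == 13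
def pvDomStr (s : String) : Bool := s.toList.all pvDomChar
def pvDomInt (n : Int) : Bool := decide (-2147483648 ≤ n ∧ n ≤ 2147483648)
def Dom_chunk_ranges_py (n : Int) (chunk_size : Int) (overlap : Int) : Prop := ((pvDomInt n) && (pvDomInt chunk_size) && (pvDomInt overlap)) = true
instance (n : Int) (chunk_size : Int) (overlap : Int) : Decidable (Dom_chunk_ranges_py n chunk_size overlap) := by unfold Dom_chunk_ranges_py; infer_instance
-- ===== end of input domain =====

-- B replaces A's append/break while-loop by a closed-form chunk count and a comprehension over range(num_chunks); same asymptotic cost.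


-- ===== PORT A =====
-- A's while loop: start advances by step (> 0, carried as a hypothesis for termination), appends (start, min(start+chunk_size, n)), breaks when end == n.
def chunkLoopA (n chunk_size step : Int) (hstep : 0 < step) (start : Int) (acc : List (Int × Int)) : List (Int × Int) :=
  if h : start < n then
    let e := min (start + chunk_size) n
    if e = n then acc ++ [(start, e)]
    else chunkLoopA n chunk_size step hstep (start + step) (acc ++ [(start, e)])
  else acc
termination_by (n - start).toNat
decreasing_by omega

def chunk_ranges_py (n : Int) (chunk_size : Int) (overlap : Int) : List (Int × Int) :=
  if n = 0 then []
  else if chunk_size ≤ 0 then []        -- raise SystemExit (outside Pre_)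
  else if overlap < 0 then []           -- raise SystemExit (outside Pre_)
  else if _h : chunk_size ≤ overlap then []  -- raise SystemExit (outside Pre_)
  else chunkLoopA n chunk_size (chunk_size - overlap) (by omega) 0 []

-- ===== PORT B =====
def chunk_ranges_py_alt (n : Int) (chunk_size : Int) (overlap : Int) : List (Int × Int) :=
  if n = 0 then []
  else if chunk_size ≤ 0 then []        -- raise SystemExit (outside Pre_)
  else if overlap < 0 then []           -- raise SystemExit (outside Pre_)
  else if chunk_size ≤ overlap then []  -- raise SystemExit (outside Pre_)
  else
    let step := chunk_size - overlap
    let num_chunks : Int := 1 + max 0 (-(PySem.Int.floordiv (chunk_size - n) step))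
    (PySem.List.pyRange 0 num_chunks 1).map (fun i => (i * step, min (i * step + chunk_size) n))

-- ===== PRECONDITION & SPEC =====
-- Pre_ excludes the inputs on which A raises SystemExit (bad chunk_size/overlap with n ≠ 0),
-- and negative n: a negative length is outside the task's natural domain (A's loop happens to return [] there).
def Pre_chunk_ranges_py (n : Int) (chunk_size : Int) (overlap : Int) : Prop :=
  0 ≤ n ∧ (n = 0 ∨ (0 < chunk_size ∧ 0 ≤ overlap ∧ overlap < chunk_size))
instance (n : Int) (chunk_size : Int) (overlap : Int) : Decidable (Pre_chunk_ranges_py n chunk_size overlap) := by unfold Pre_chunk_ranges_py; infer_instance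
def pvWitness_chunk_ranges_py : Int × Int × Int := (10, 4, 1)

def Spec_chunk_ranges_py (n : Int) (chunk_size : Int) (overlap : Int) (out : List (Int × Int)) : Prop := out = chunk_ranges_py_alt n chunk_size overlap
instance (n : Int) (chunk_size : Int) (overlap : Int) (out : List (Int × Int)) : Decidable (Spec_chunk_ranges_py n chunk_size overlap out) := by unfold Spec_chunk_ranges_py; infer_instance

-- ===== CLAIM (what is proved, stated in full; the proofs are below) =====
def Claim_equal_chunk_ranges_py : Prop := ∀ (n : Int) (chunk_size : Int) (overlap : Int), Dom_chunk_ranges_py n chunk_size overlap → Pre_chunk_ranges_py n chunk_size overlap → Spec_chunk_ranges_py n chunk_size overlap (chunk_ranges_py n chunk_size overlap)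

-- ===== LEMMAS AND PROOFS =====

-- The loop's accumulator only prefixes the result.
theorem chunkLoopA_acc (n chunk_size step : Int) (hstep : 0 < step) (start : Int) (acc : List (Int × Int)) :
    chunkLoopA n chunk_size step hstep start acc = acc ++ chunkLoopA n chunk_size step hstep start [] := by
  obtain ⟨k, hk⟩ : ∃ k, (n - start).toNat = k := ⟨_, rfl⟩
  induction k using Nat.strong_induction_on generalizing start acc with
  | _ k ih =>
    rw [chunkLoopA, chunkLoopA]
    by_cases h : start < n
    · simp only [dif_pos h]
      by_cases he : min (start + chunk_size) n = n
      · simp only [if_pos he]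
        simp
      · simp only [if_neg he]
        rw [ih (n - (start + step)).toNat (by omega) (start + step) (acc ++ [(start, min (start + chunk_size) n)]) rfl,
            ih (n - (start + step)).toNat (by omega) (start + step) ([] ++ [(start, min (start + chunk_size) n)]) rfl]
        simp
    · simp [dif_neg h]

-- Main invariant: starting at i*step, the loop produces exactly chunks i..m of the closed form.
theorem chunkLoopA_eq_map (n cs step : Int) (hstep : 0 < step) (hcs : step ≤ cs) (m : Int)
    (hm1 : ∀ i : Int, 0 ≤ i → i < m → i * step + cs < n)
    (hm2 : n ≤ m * step + cs) (hm3 : m * step < n)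
    (i : Int) (hi0 : 0 ≤ i) (him : i ≤ m) :
    chunkLoopA n cs step hstep (i * step) [] =
      (PySem.List.pyRange i (m + 1) 1).map (fun j => (j * step, min (j * step + cs) n)) := by
  obtain ⟨k, hk⟩ : ∃ k, (m - i).toNat = k := ⟨_, rfl⟩
  induction k generalizing i with
  | zero =>
    have hieq : i = m := by omega
    subst hieq
    rw [chunkLoopA, dif_pos hm3]
    have he : min (i * step + cs) n = n := by omega
    simp only [he, if_pos]
    rw [PySem.List.pyRange_one_cons (by omega), PySem.List.pyRange_one_eq_nil (by omega)]
    simp [he]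
  | succ k ih =>
    have hilt : i < m := by omega
    have hcsn : i * step + cs < n := hm1 i hi0 hilt
    have hcs0 : 0 < cs := lt_of_lt_of_le hstep hcs
    have hstart : i * step < n := by omega
    rw [chunkLoopA, dif_pos hstart]
    have he : min (i * step + cs) n = i * step + cs := by omega
    simp only [he, if_neg (by omega : ¬ (i * step + cs = n))]
    rw [chunkLoopA_acc]
    have hnext : i * step + step = (i + 1) * step := by ring
    rw [hnext, ih (i + 1) (by omega) (by omega) (by omega)]
    rw [PySem.List.pyRange_one_cons (by omega : i < m + 1)]
    simp [he]

-- ===== VERDICT (by name: the statement is the Claim_ definition above) =====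
theorem chunk_ranges_py_spec : Claim_equal_chunk_ranges_py := by
  intro n cs ov _ hpre
  obtain ⟨hn0, hpre⟩ := hpre
  unfold Spec_chunk_ranges_py chunk_ranges_py chunk_ranges_py_alt
  by_cases h0 : n = 0
  · simp [h0]
  rcases hpre with h | ⟨hcs, hov0, hovcs⟩
  · exact absurd h h0
  rw [if_neg h0, if_neg h0, if_neg (by omega : ¬ cs ≤ 0), if_neg (by omega : ¬ cs ≤ 0),
      if_neg (by omega : ¬ ov < 0), if_neg (by omega : ¬ ov < 0),
      dif_neg (by omega : ¬ cs ≤ ov), if_neg (by omega : ¬ cs ≤ ov)]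
  set step := cs - ov with hstepdef
  have hstep : 0 < step := by omega
  have hn : 0 < n := by omega
  set q := PySem.Int.floordiv (cs - n) step with hq
  have hb := (PySem.Int.floordiv_eq_iff_of_pos (a := cs - n) (b := step) (q := q) (hb := hstep)).mp hq.symm
  set m := max 0 (-q) with hm
  have hm0 : 0 ≤ m := le_max_left _ _
  have hm2 : n ≤ m * step + cs := by
    rcases le_or_gt (-q) 0 with hc | hc
    · have : m = 0 := by omega
      have hq0 : 0 ≤ q := by omega
      nlinarith [hb.1]
    · have : m = -q := by omega
      nlinarith [hb.1]
  have hm3 : m * step < n := by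
    rcases le_or_gt (-q) 0 with hc | hc
    · have hmz : m = 0 := by omega
      rw [hmz, zero_mul]; exact hn
    · have hmq : m = -q := by omega
      have h2 : cs - n < (q + 1) * step := hb.2
      nlinarith
  have hm1 : ∀ i : Int, 0 ≤ i → i < m → i * step + cs < n := by
    intro i hi0 him
    have hmq : m = -q := by omega
    have h2 : cs - n < (q + 1) * step := hb.2
    have hile : i ≤ -q - 1 := by omega
    nlinarith
  have := chunkLoopA_eq_map n cs step hstep (by omega) m hm1 hm2 hm3 0 le_rfl hm0
  rw [zero_mul] at this
  rw [this]
  have hmc : (1 : Int) + max 0 (-q) = m + 1 := by omega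
  show List.map (fun j => (j * step, min (j * step + cs) n)) (PySem.List.pyRange 0 (m + 1) 1) =
       List.map (fun j => (j * step, min (j * step + cs) n)) (PySem.List.pyRange 0 (1 + max 0 (-q)) 1)
  rw [hmc]
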